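-- pv_equiv track=rewrite | github.com/Daweedek/GeneralJack | gamefunctions.py | textAdapt2
-- ===== SOURCE A (Python) =====
-- def textAdapt2(text): #for speech
--     textLenght = len(text)
--     rest = textLenght % 76
--     missing = 76 - rest
--     indexing = 0
--     process = ""
--     edited = ""
--     #making text enough long
--     if rest != 0:
--         text += missing*" "
--     #modifying text
--     process += "| "
--     for char in text:
--         process += char
--         indexing += 1
--         if indexing %76 == 0:
--             process += " |\n| "
--             edited += process
--             process = ""
--     return edited[:-2]
-- ===== SOURCE B (Python) =====
-- def textAdapt2(text):
--     pad = (-len(text)) % 76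
--     text += pad * " "
--     lines = ["| " + text[i:i+76] + " |" for i in range(0, len(text), 76)]
--     if not lines:
--         return ""
--     return "\n".join(lines) + "\n"
-- ===== Notes on version B (the rewrite author's own statement) =====
-- stated objective: simpler
-- what changed: B drops A's per-character loop with its counter, modulo boundary check, sentinel accumulation and final two-character truncation; instead it computes the padding once, slices the padded text into 76-character chunks, wraps each chunk in the border, and newline-joins the lines.
import Mathlib
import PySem

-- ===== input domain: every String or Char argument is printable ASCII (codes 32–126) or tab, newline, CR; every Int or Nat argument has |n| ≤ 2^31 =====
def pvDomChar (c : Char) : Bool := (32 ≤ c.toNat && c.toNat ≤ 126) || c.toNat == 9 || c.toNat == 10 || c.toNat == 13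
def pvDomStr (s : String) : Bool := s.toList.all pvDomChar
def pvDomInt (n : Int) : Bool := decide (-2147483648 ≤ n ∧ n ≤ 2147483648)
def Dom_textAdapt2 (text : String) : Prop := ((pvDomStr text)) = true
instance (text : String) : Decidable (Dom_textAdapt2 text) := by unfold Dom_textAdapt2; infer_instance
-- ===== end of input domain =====

-- B replaces A's per-character counter loop with its " |\n| " sentinel and [:-2] truncation
-- by padding once, slicing into 76-char chunks and joining bordered lines (objective: simpler).

-- ===== PORT A =====
-- the for-loop over the characters with its three accumulators (indexing, process, edited)
def pvLoopA : List Char → Nat → List Char → List Char → List Char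
  | [], _, _, edited => edited
  | c :: rest, indexing, process, edited =>
    let process' := process ++ [c]
    let indexing' := indexing + 1
    if indexing' % 76 == 0 then
      pvLoopA rest indexing' [] (edited ++ process' ++ (" |\n| ".toList))
    else
      pvLoopA rest indexing' process' edited

def textAdapt2 (text : String) : String :=
  let t := text.toList
  let textLenght := t.length
  let rest := textLenght % 76
  let missing := 76 - rest
  let t' := if rest ≠ 0 then t ++ List.replicate missing ' ' else t
  -- the loop starts with process = "| "; the result is edited[:-2]
  String.ofList (PySem.List.slice (pvLoopA t' 0 ("| ".toList) []) none (some (-2)))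

-- ===== PORT B =====
def textAdapt2_alt (text : String) : String :=
  let t := text.toList
  let pad := (PySem.Int.mod (-(t.length : Int)) 76).toNat
  let padded := t ++ List.replicate pad ' '
  let lines := (PySem.List.pyRange 0 (padded.length : Int) 76).map
    (fun i => "| ".toList ++ PySem.List.slice padded (some i) (some (i + 76)) ++ " |".toList)
  if lines = [] then "" else String.ofList (PySem.Chars.join ("\n".toList) lines ++ "\n".toList)

-- ===== PRECONDITION & SPEC =====
def Spec_textAdapt2 (text : String) (out : String) : Prop := out = textAdapt2_alt text
instance (text : String) (out : String) : Decidable (Spec_textAdapt2 text out) := by unfold Spec_textAdapt2; infer_instance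

-- ===== CLAIM (what is proved, stated in full; the proofs are below) =====
def Claim_equal_textAdapt2 : Prop := ∀ (text : String), Dom_textAdapt2 text → Spec_textAdapt2 text (textAdapt2 text)

-- ===== LEMMAS AND PROOFS =====

-- canonical rendering of a padded char list as bordered lines, one 76-char chunk at a time
def pvRender (l : List Char) : List Char :=
  if l = [] then []
  else "| ".toList ++ l.take 76 ++ " |\n".toList ++ pvRender (l.drop 76)
termination_by l.length
decreasing_by
  rename_i h
  have : l.length ≠ 0 := fun h0 => h (List.eq_nil_of_length_eq_zero h0)
  simp [List.length_drop]
  omega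

-- the loop's contribution for a 76-multiple tail (each chunk followed by " |\n| ")
def pvBody (l : List Char) : List Char :=
  if l = [] then []
  else l.take 76 ++ " |\n| ".toList ++ pvBody (l.drop 76)
termination_by l.length
decreasing_by
  rename_i h
  have : l.length ≠ 0 := fun h0 => h (List.eq_nil_of_length_eq_zero h0)
  simp [List.length_drop]
  omega

-- A's loop consumes one full 76-char chunk: counter goes from 76k+j to 76(k+1)
theorem pvLoopA_step (chunk : List Char) : ∀ (j k : Nat) (l p e : List Char),
    chunk.length + j = 76 → j < 76 →
    pvLoopA (chunk ++ l) (76 * k + j) p e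
      = pvLoopA l (76 * (k + 1)) [] (e ++ p ++ chunk ++ " |\n| ".toList) := by
  induction chunk with
  | nil => intro j k l p e h hj; simp at h; omega
  | cons c cs ih =>
    intro j k l p e h hj
    simp only [List.length_cons] at h
    simp only [List.cons_append, pvLoopA]
    by_cases hcs : cs = []
    · subst hcs
      have hj75 : j = 75 := by simp at h; omega
      subst hj75
      have hm : (76 * k + 75 + 1) % 76 = 0 := by omega
      simp only [hm, beq_self_eq_true, if_true]
      have h2 : 76 * k + 75 + 1 = 76 * (k + 1) := by ring
      rw [h2]
      simp
    · have hlen : 0 < cs.length := List.length_pos_iff.mpr hcs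
      have hmod : (76 * k + j + 1) % 76 = j + 1 := by omega
      have hb : ((76 * k + j + 1) % 76 == 0) = false := by
        simp [hmod]
      simp only [hb, Bool.false_eq_true, if_false]
      have h1 : 76 * k + j + 1 = 76 * k + (j + 1) := by ring
      rw [h1, ih (j + 1) k l (p ++ [c]) e (by omega) (by omega)]
      simp

-- closed form of A's loop on a 76-multiple-length list
theorem pvLoopA_eq : ∀ (m : Nat) (l : List Char) (k : Nat) (p e : List Char),
    l.length = 76 * m →
    pvLoopA l (76 * k) p e = e ++ (if l = [] then [] else p ++ pvBody l) := by
  intro m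
  induction m with
  | zero =>
    intro l k p e h
    have : l = [] := List.length_eq_zero_iff.mp (by omega)
    subst this
    simp [pvLoopA]
  | succ n ih =>
    intro l k p e h
    have hne : l ≠ [] := by
      intro hl; subst hl; simp at h
    have hsplit : l = l.take 76 ++ l.drop 76 := (List.take_append_drop 76 l).symm
    have hlen76 : (l.take 76).length = 76 := by
      simp [List.length_take]; omega
    have hstep := pvLoopA_step (l.take 76) 0 k (l.drop 76) p e (by omega) (by omega)
    conv_lhs => rw [hsplit]
    rw [show 76 * k = 76 * k + 0 from rfl] at hstep ⊢
    rw [hstep]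
    rw [ih (l.drop 76) (k + 1) [] (e ++ p ++ l.take 76 ++ " |\n| ".toList)
      (by simp [List.length_drop]; omega)]
    conv_rhs => rw [pvBody]
    simp only [hne, if_false]
    by_cases hd : l.drop 76 = []
    · simp [hd]
      rw [pvBody.eq_def]; simp
    · simp [hd]

-- "| " ++ pvBody l  is  pvRender l ++ "| "  for nonempty 76-multiple-length l
theorem pvBody_render : ∀ (m : Nat) (l : List Char), l.length = 76 * m → l ≠ [] →
    "| ".toList ++ pvBody l = pvRender l ++ "| ".toList := by
  intro m
  induction m with
  | zero =>
    intro l h hne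
    exact absurd (List.length_eq_zero_iff.mp (by omega)) hne
  | succ n ih =>
    intro l h hne
    rw [pvBody, pvRender]
    simp only [hne, if_false]
    by_cases hd : l.drop 76 = []
    · rw [pvBody.eq_def, pvRender.eq_def]
      simp [hd]
    · rw [← List.append_assoc, ← List.append_assoc]
      rw [show ("| ".toList ++ l.take 76 ++ " |\n| ".toList : List Char)
            = "| ".toList ++ l.take 76 ++ " |\n".toList ++ "| ".toList by simp]
      rw [List.append_assoc ("| ".toList ++ l.take 76 ++ " |\n".toList)]
      rw [ih (l.drop 76) (by simp [List.length_drop]; omega) hd]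
      simp

theorem pvLine_shift (l : List Char) (k : Nat) :
    (l.drop (76 * (k + 1))).take 76 = ((l.drop 76).drop (76 * k)).take 76 := by
  rw [List.drop_drop]
  rw [show 76 + 76 * k = 76 * (k + 1) by ring]

-- B's joined lines also equal pvRender
theorem pvJoin_render : ∀ (m : Nat) (l : List Char), l.length = 76 * m → 0 < m →
    PySem.Chars.join ("\n".toList)
        ((List.range m).map (fun k =>
          "| ".toList ++ (l.drop (76 * k)).take 76 ++ " |".toList))
      ++ "\n".toList = pvRender l := by
  intro m
  induction m with
  | zero => intro l h hm; omega
  | succ n ih =>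
    intro l h _
    have hne : l ≠ [] := by intro hl; subst hl; simp at h
    rw [pvRender]
    simp only [hne, if_false]
    rw [List.range_succ_eq_map, List.map_cons, List.map_map]
    have hmap : (List.map ((fun k => "| ".toList ++ (l.drop (76 * k)).take 76 ++ " |".toList) ∘ Nat.succ) (List.range n))
        = (List.range n).map (fun k => "| ".toList ++ ((l.drop 76).drop (76 * k)).take 76 ++ " |".toList) := by
      apply List.map_congr_left
      intro k _
      simp [Function.comp, pvLine_shift l k]
    rw [hmap]
    cases n with
    | zero =>
      have hd : l.drop 76 = [] := by
        apply List.eq_nil_of_length_eq_zero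
        simp [List.length_drop]; omega
      rw [pvRender.eq_def]
      simp [hd, PySem.Chars.join_singleton]
    | succ n' =>
      have hlen : (l.drop 76).length = 76 * (n' + 1) := by
        simp [List.length_drop]; omega
      have := ih (l.drop 76) hlen (by omega)
      rw [List.range_succ_eq_map, List.map_cons] at this ⊢
      rw [PySem.Chars.join_cons_cons]
      rw [← this]
      simp

-- the equivalence itself (used by the verdict theorem)
theorem pvMain (text : String) : textAdapt2 text = textAdapt2_alt text := by
  unfold textAdapt2 textAdapt2_alt
  simp only []
  set t := text.toList with ht
  set n := t.length with hn
  have hpad : (PySem.Int.mod (-(n : Int)) 76).toNat = (76 - n % 76) % 76 := by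
    rw [PySem.Int.mod_eq_emod_of_pos (by omega)]
    omega
  rw [hpad]
  set pad := (76 - n % 76) % 76 with hpd
  have hAeq : (if n % 76 ≠ 0 then t ++ List.replicate (76 - n % 76) ' ' else t)
      = t ++ List.replicate pad ' ' := by
    by_cases h0 : n % 76 = 0
    · have hp0 : pad = 0 := by omega
      simp [h0, hp0]
    · have hp1 : pad = 76 - n % 76 := by omega
      simp only [h0, ne_eq, not_false_iff, if_true, hp1]
  rw [hAeq]
  set padded := t ++ List.replicate pad ' ' with hpadded
  have hplen : padded.length = n + pad := by simp [hpadded]; omega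
  have hmul : (n + pad) % 76 = 0 := by omega
  set m := (n + pad) / 76 with hm
  have hplen76 : padded.length = 76 * m := by omega
  by_cases hmz : m = 0
  · have hpe : padded = [] := by
      apply List.eq_nil_of_length_eq_zero; omega
    rw [hpe]
    have : pvLoopA [] 0 ("| ".toList) [] = [] := rfl
    rw [this]
    have hr : PySem.List.pyRange 0 (([] : List Char).length : Int) 76 = [] := by
      rw [PySem.List.pyRange_of_pos _ _ (by omega)]
      simp
    rw [hr]
    simp [PySem.List.slice]
  · have hmpos : 0 < m := Nat.pos_of_ne_zero hmz
    have hpne : padded ≠ [] := by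
      intro h; rw [h] at hplen76; simp at hplen76; omega
    -- A side
    have hA := pvLoopA_eq m padded 0 ("| ".toList) [] hplen76
    rw [show (76 * 0 : Nat) = 0 by rfl] at hA
    rw [hA]
    simp only [hpne, if_false, List.nil_append]
    rw [pvBody_render m padded hplen76 hpne]
    rw [PySem.List.slice_to_neg_ofNat _ 2 (by omega)]
    rw [show (pvRender padded ++ "| ".toList).length - 2 = (pvRender padded).length by
      simp]
    rw [List.take_left]
    -- B side
    have hrange : PySem.List.pyRange 0 (padded.length : Int) 76
        = (List.range m).map (fun k => ((76 * k : Nat) : Int)) := by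
      rw [PySem.List.pyRange_of_pos _ _ (by omega : (0:Int) < 76)]
      have hlt : (0 : Int) < (padded.length : Int) := by
        rw [hplen76]; push_cast; omega
      rw [if_pos hlt]
      have : (((padded.length : Int) - 0 + 76 - 1) / 76).toNat = m := by
        rw [hplen76]; push_cast; omega
      rw [this]
      apply List.map_congr_left
      intro k _
      push_cast; ring
    rw [hrange, List.map_map]
    have hlines : (List.map ((fun i => "| ".toList ++ PySem.List.slice padded (some i) (some (i + 76)) ++ " |".toList) ∘ (fun k => ((76 * k : Nat) : Int))) (List.range m))
        = (List.range m).map (fun k => "| ".toList ++ (padded.drop (76 * k)).take 76 ++ " |".toList) := by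
      apply List.map_congr_left
      intro k _
      simp only [Function.comp]
      congr 1
      congr 1
      rw [show ((76 * k : Nat) : Int) + 76 = ((76 * k : Nat) : Int) + ((76 : Nat) : Int) by push_cast; ring]
      rw [PySem.List.slice_natCast_add]
    rw [hlines]
    have hnonnil : (List.range m).map (fun k => "| ".toList ++ (padded.drop (76 * k)).take 76 ++ " |".toList) ≠ [] := by
      simp [List.map_eq_nil_iff, List.range_eq_nil]
      omega
    rw [if_neg hnonnil]
    rw [pvJoin_render m padded hplen76 hmpos]

-- ===== VERDICT (by name: the statement is the Claim_ definition above) =====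
theorem textAdapt2_spec : Claim_equal_textAdapt2 := by
  intro text _
  exact pvMain text
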